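-- pv_equiv track=rewrite | github.com/willy2358/LXQEnjoy | Source/server/SocketServer/TestSocket的副本/GameRules/WinTester_Majiang.py | __get_forward_bad_cards
-- ===== SOURCE A (Python) =====
-- def __get_forward_bad_cards(cards):
--     remainTests = cards[:]
--     remainTests.sort()
--     bads = []
--     while remainTests and len(remainTests) > 0:
--         head = remainTests[0]
--         if (head + 1) in remainTests and (head + 2) in remainTests:
--             remainTests.remove(head)
--             remainTests.remove(head + 1)
--             remainTests.remove(head + 2)
--         else:
--             remainTests.remove(head)
--             bads.append(head)
--
--     return bads
-- ===== SOURCE B (Python) =====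
-- def __get_forward_bad_cards(cards):
--     # Counter over sorted distinct values: drain each value with O(1) count
--     # lookups for v+1 / v+2 instead of repeated membership scans and removals.
--     cnt = {}
--     for c in cards:
--         cnt[c] = cnt.get(c, 0) + 1
--     bads = []
--     for v in sorted(cnt):
--         c = cnt[v]
--         t = min(c, cnt.get(v + 1, 0), cnt.get(v + 2, 0))
--         bads.extend([v] * (c - t))
--         cnt[v + 1] = cnt.get(v + 1, 0) - t
--         cnt[v + 2] = cnt.get(v + 2, 0) - t
--     return bads
-- ===== Notes on version B (the rewrite author's own statement) =====
-- stated objective: faster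
-- what changed: Replaces A's quadratic loop (repeated membership scans and list.remove on the sorted list, one card at a time) by a counter dict drained once per distinct value in ascending order, taking min(count v, count v+1, count v+2) runs per value with O(1) lookups.
import Mathlib
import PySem

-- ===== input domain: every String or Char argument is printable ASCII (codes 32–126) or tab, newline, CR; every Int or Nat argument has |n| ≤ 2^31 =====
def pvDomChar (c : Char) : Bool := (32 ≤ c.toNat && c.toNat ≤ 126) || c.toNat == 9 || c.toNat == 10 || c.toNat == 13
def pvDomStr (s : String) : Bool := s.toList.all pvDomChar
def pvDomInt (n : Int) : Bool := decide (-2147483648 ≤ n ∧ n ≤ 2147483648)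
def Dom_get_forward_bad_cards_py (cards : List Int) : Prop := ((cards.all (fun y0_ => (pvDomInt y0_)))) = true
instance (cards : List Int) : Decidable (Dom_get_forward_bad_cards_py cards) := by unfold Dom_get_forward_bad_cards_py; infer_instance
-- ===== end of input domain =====

-- B replaces A's quadratic scan-and-remove loop over the sorted list by a counter
-- drained once per distinct value in ascending order (return value only; neither
-- version mutates its argument).

-- ===== PORT A =====
-- termination helper for the loop below (cited in decreasing_by)
theorem pv_remove?_some_length {xs r : List Int} {v : Int}
    (h : PySem.List.remove? xs v = some r) : r.length < xs.length := by
  by_cases hv : v ∈ xs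
  · rw [PySem.List.remove?_eq_some_erase _ _ hv] at h
    cases h
    have := List.length_erase_of_mem hv
    have : xs ≠ [] := by rintro rfl; simp at hv
    have hx : 0 < xs.length := List.length_pos_iff.mpr this
    omega
  · rw [← PySem.List.remove?_eq_none_iff (v := v) (xs := xs)] at hv
    simp [h] at hv

-- the while-loop of A: head = remainTests[0]; run removal or bad-card append
def aLoop : List Int → List Int
  | [] => []
  | head :: rest =>
    if (head + 1) ∈ (head :: rest) ∧ (head + 2) ∈ (head :: rest) then
      -- remainTests.remove(head) drops index 0, then remove head+1 and head+2
      match h1 : PySem.List.remove? rest (head + 1) with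
      | none => []  -- unreachable: the `if` guarantees membership (Python raises ValueError)
      | some r1 =>
        match h2 : PySem.List.remove? r1 (head + 2) with
        | none => []  -- unreachable likewise
        | some r2 => aLoop r2
    else
      head :: aLoop rest
termination_by l => l.length
decreasing_by
  · have a := pv_remove?_some_length h1
    have b := pv_remove?_some_length h2
    simp; omega
  · simp

def get_forward_bad_cards_py (cards : List Int) : List Int :=
  aLoop (PySem.List.sorted cards (fun x => x) false)

-- ===== PORT B =====
-- for v in sorted(cnt): drain value v with O(1) count lookups
def bLoop : List Int → PySem.Dict Int Int → List Int
  | [], _ => []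
  | v :: vs, cnt =>
    let c := cnt.getD v 0
    let t := min c (min (cnt.getD (v + 1) 0) (cnt.getD (v + 2) 0))
    let cnt1 := cnt.insert (v + 1) (cnt.getD (v + 1) 0 - t)
    let cnt2 := cnt1.insert (v + 2) (cnt1.getD (v + 2) 0 - t)
    PySem.List.pyRepeat [v] (c - t) ++ bLoop vs cnt2

def get_forward_bad_cards_py_alt (cards : List Int) : List Int :=
  let cnt := cards.foldl (fun d x => d.insert x (d.getD x 0 + 1)) PySem.Dict.empty
  bLoop (PySem.List.sorted cnt.keys (fun x => x) false) cnt

-- ===== PRECONDITION & SPEC =====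
def Spec_get_forward_bad_cards_py (cards : List Int) (out : List Int) : Prop := out = get_forward_bad_cards_py_alt cards
instance (cards : List Int) (out : List Int) : Decidable (Spec_get_forward_bad_cards_py cards out) := by unfold Spec_get_forward_bad_cards_py; infer_instance

-- ===== CLAIM (what is proved, stated in full; the proofs are below) =====
def Claim_equal_get_forward_bad_cards_py : Prop := ∀ (cards : List Int), Dom_get_forward_bad_cards_py cards → Spec_get_forward_bad_cards_py cards (get_forward_bad_cards_py cards)

-- ===== LEMMAS AND PROOFS =====

-- B's loop with the counter abstracted to a plain function Int → Int
def fLoop : List Int → (Int → Int) → List Int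
  | [], _ => []
  | v :: vs, f =>
    let c := f v
    let t := min c (min (f (v + 1)) (f (v + 2)))
    List.replicate (c - t).toNat v ++
      fLoop vs (fun w => if w = v + 2 then f (v + 2) - t else if w = v + 1 then f (v + 1) - t else f w)

theorem fLoop_congr (vs : List Int) (f g : Int → Int) (h : ∀ w, f w = g w) :
    fLoop vs f = fLoop vs g := by
  cases vs with
  | nil => rfl
  | cons v vs => simp only [fLoop, h]

theorem bLoop_eq_fLoop (vs : List Int) (cnt : PySem.Dict Int Int) :
    bLoop vs cnt = fLoop vs (fun w => cnt.getD w 0) := by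
  induction vs generalizing cnt with
  | nil => rfl
  | cons v vs ih =>
      simp only [bLoop, fLoop, PySem.List.pyRepeat_singleton]
      congr 1
      rw [ih]
      apply fLoop_congr
      intro w
      have hne : (v + 2 : Int) ≠ v + 1 := by omega
      simp only [PySem.Dict.getD_insert]
      by_cases hw2 : w = v + 2 <;> by_cases hw1 : w = v + 1 <;>
        simp [hw1, hw2, hne]

-- decomposition of a sorted list bounded below by v
theorem sorted_decomp (v : Int) (s : List Int) (hs : s.Pairwise (· ≤ ·))
    (hb : ∀ x ∈ s, v ≤ x) :
    ∃ r, s = List.replicate (s.count v) v ++ r ∧ r.Pairwise (· ≤ ·) ∧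
      (∀ x ∈ r, v + 1 ≤ x) ∧ (∀ w, r.count w = if w = v then 0 else s.count w) := by
  induction s with
  | nil => exact ⟨[], by simp⟩
  | cons x s ih =>
      have hs' : s.Pairwise (· ≤ ·) := hs.tail
      have hxs : ∀ y ∈ s, x ≤ y := fun y hy => (List.pairwise_cons.mp hs).1 y hy
      by_cases hx : x = v
      · subst hx
        obtain ⟨r, he, hrp, hrb, hrc⟩ := ih hs' (fun y hy => hxs y hy)
        refine ⟨r, ?_, hrp, hrb, ?_⟩
        · rw [List.count_cons_self, List.replicate_succ]
          simpa using he
        · intro w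
          rcases eq_or_ne w x with rfl | hw
          · simpa using hrc w
          · have := hrc w
            simp [hw, Ne.symm hw] at this ⊢
            omega
      · have hvx : v < x := lt_of_le_of_ne (hb x (by simp)) (Ne.symm hx)
        have hnot : v ∉ x :: s := by
          intro hm
          rcases List.mem_cons.mp hm with rfl | hm
          · exact hx rfl
          · exact absurd (hxs v hm) (by omega)
        refine ⟨x :: s, ?_, hs, ?_, ?_⟩
        · simp [List.count_eq_zero_of_not_mem hnot]
        · intro y hy
          rcases List.mem_cons.mp hy with rfl | hy
          · omega
          · have := hxs y hy; omega
        · intro w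
          rcases eq_or_ne w v with rfl | hw
          · simp [List.count_eq_zero_of_not_mem hnot]
          · simp [hw]

theorem remove?_append_not_mem {l1 l2 : List Int} {v : Int} (h : v ∉ l1) :
    PySem.List.remove? (l1 ++ l2) v = (PySem.List.remove? l2 v).map (l1 ++ ·) := by
  induction l1 with
  | nil => simp
  | cons x l1 ih =>
      have hx : x ≠ v := by rintro rfl; simp at h
      have h' : v ∉ l1 := by intro hm; exact h (List.mem_cons_of_mem _ hm)
      simp only [List.cons_append, PySem.List.remove?_cons_of_ne _ hx, ih h', Option.map_map]
      rfl

theorem aLoop_nil : aLoop [] = [] := by rw [aLoop]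

theorem aLoop_cons_neg (head : Int) (rest : List Int)
    (hc : ¬((head + 1) ∈ (head :: rest) ∧ (head + 2) ∈ (head :: rest))) :
    aLoop (head :: rest) = head :: aLoop rest := by
  rw [aLoop, if_neg hc]

theorem aLoop_cons_pos (head : Int) (rest r1 r2 : List Int)
    (hc : (head + 1) ∈ (head :: rest) ∧ (head + 2) ∈ (head :: rest))
    (h1 : PySem.List.remove? rest (head + 1) = some r1)
    (h2 : PySem.List.remove? r1 (head + 2) = some r2) :
    aLoop (head :: rest) = aLoop r2 := by
  rw [aLoop, if_pos hc]
  split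
  · next heq => rw [h1] at heq; cases heq
  · next r1' heq =>
      rw [h1] at heq; cases heq
      split
      · next heq2 => rw [h2] at heq2; cases heq2
      · next r2' heq2 => rw [h2] at heq2; cases heq2; rfl

-- the crux: A's loop drains one value by min(c0, c1, c2) runs, rest are bad
theorem inner (v : Int) (c0 c1 c2 : Nat) (r : List Int) (hr : ∀ x ∈ r, v + 3 ≤ x) :
    aLoop (List.replicate c0 v ++ (List.replicate c1 (v + 1) ++ (List.replicate c2 (v + 2) ++ r)))
      = List.replicate (c0 - min c0 (min c1 c2)) v ++
        aLoop (List.replicate (c1 - min c0 (min c1 c2)) (v + 1) ++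
               (List.replicate (c2 - min c0 (min c1 c2)) (v + 2) ++ r)) := by
  have hnr1 : (v + 1) ∉ r := fun h => by have := hr _ h; omega
  have hnr2 : (v + 2) ∉ r := fun h => by have := hr _ h; omega
  induction c0 generalizing c1 c2 with
  | zero => simp
  | succ c0 ih =>
      have hT : List.replicate (c0 + 1) v ++ (List.replicate c1 (v + 1) ++ (List.replicate c2 (v + 2) ++ r))
          = v :: (List.replicate c0 v ++ (List.replicate c1 (v + 1) ++ (List.replicate c2 (v + 2) ++ r))) := by
        simp [List.replicate_succ]
      rw [hT]
      have hm1 : ((v + 1) ∈ v :: (List.replicate c0 v ++ (List.replicate c1 (v + 1) ++ (List.replicate c2 (v + 2) ++ r)))) ↔ 0 < c1 := by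
        simp only [List.mem_cons, List.mem_append, List.mem_replicate]
        constructor
        · rintro (h | ⟨_, h⟩ | ⟨h1', h⟩ | ⟨_, h⟩ | h)
          · omega
          · omega
          · omega
          · omega
          · exact absurd h hnr1
        · intro h; exact Or.inr (Or.inr (Or.inl ⟨by omega, trivial⟩))
      have hm2 : ((v + 2) ∈ v :: (List.replicate c0 v ++ (List.replicate c1 (v + 1) ++ (List.replicate c2 (v + 2) ++ r)))) ↔ 0 < c2 := by
        simp only [List.mem_cons, List.mem_append, List.mem_replicate]
        constructor
        · rintro (h | ⟨_, h⟩ | ⟨_, h⟩ | ⟨h2', h⟩ | h)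
          · omega
          · omega
          · omega
          · omega
          · exact absurd h hnr2
        · intro h; exact Or.inr (Or.inr (Or.inr (Or.inl ⟨by omega, trivial⟩)))
      by_cases hc12 : 0 < c1 ∧ 0 < c2
      · obtain ⟨hc1, hc2⟩ := hc12
        obtain ⟨c1', rfl⟩ : ∃ c1', c1 = c1' + 1 := ⟨c1 - 1, by omega⟩
        obtain ⟨c2', rfl⟩ : ∃ c2', c2 = c2' + 1 := ⟨c2 - 1, by omega⟩
        have hn0 : (v + 1) ∉ List.replicate c0 v := by
          simp only [List.mem_replicate, not_and]; intro _; omega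
        have hn0' : (v + 2) ∉ List.replicate c0 v := by
          simp only [List.mem_replicate, not_and]; intro _; omega
        have hn1' : (v + 2) ∉ List.replicate c1' (v + 1) := by
          simp only [List.mem_replicate, not_and]; intro _; omega
        have h1 : PySem.List.remove? (List.replicate c0 v ++ (List.replicate (c1' + 1) (v + 1) ++ (List.replicate (c2' + 1) (v + 2) ++ r))) (v + 1)
            = some (List.replicate c0 v ++ (List.replicate c1' (v + 1) ++ (List.replicate (c2' + 1) (v + 2) ++ r))) := by
          rw [remove?_append_not_mem hn0]
          rw [show List.replicate (c1' + 1) (v + 1) ++ (List.replicate (c2' + 1) (v + 2) ++ r)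
              = (v + 1) :: (List.replicate c1' (v + 1) ++ (List.replicate (c2' + 1) (v + 2) ++ r)) by
            simp [List.replicate_succ]]
          rw [PySem.List.remove?_cons_self]
          rfl
        have h2 : PySem.List.remove? (List.replicate c0 v ++ (List.replicate c1' (v + 1) ++ (List.replicate (c2' + 1) (v + 2) ++ r))) (v + 2)
            = some (List.replicate c0 v ++ (List.replicate c1' (v + 1) ++ (List.replicate c2' (v + 2) ++ r))) := by
          rw [remove?_append_not_mem hn0', remove?_append_not_mem hn1']
          rw [show List.replicate (c2' + 1) (v + 2) ++ r = (v + 2) :: (List.replicate c2' (v + 2) ++ r) by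
            simp [List.replicate_succ]]
          rw [PySem.List.remove?_cons_self]
          rfl
        rw [aLoop_cons_pos _ _ _ _ ⟨hm1.mpr hc1, hm2.mpr hc2⟩ h1 h2]
        rw [ih c1' c2']
        have hM : min (c0 + 1) (min (c1' + 1) (c2' + 1)) = min c0 (min c1' c2') + 1 := by omega
        rw [hM]
        have e0 : c0 + 1 - (min c0 (min c1' c2') + 1) = c0 - min c0 (min c1' c2') := by omega
        have e1 : c1' + 1 - (min c0 (min c1' c2') + 1) = c1' - min c0 (min c1' c2') := by omega
        have e2 : c2' + 1 - (min c0 (min c1' c2') + 1) = c2' - min c0 (min c1' c2') := by omega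
        rw [e0, e1, e2]
      · have hc : ¬((v + 1) ∈ v :: (List.replicate c0 v ++ (List.replicate c1 (v + 1) ++ (List.replicate c2 (v + 2) ++ r)))
            ∧ (v + 2) ∈ v :: (List.replicate c0 v ++ (List.replicate c1 (v + 1) ++ (List.replicate c2 (v + 2) ++ r)))) := by
          rw [hm1, hm2]; omega
        rw [aLoop_cons_neg _ _ hc, ih c1 c2]
        have hM : min (c0 + 1) (min c1 c2) = 0 := by omega
        have hM0 : min c0 (min c1 c2) = 0 := by omega
        rw [hM, hM0]
        simp [List.replicate_succ]

theorem pairwise_replicate_le (n : Nat) (a : Int) : (List.replicate n a).Pairwise (· ≤ ·) := by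
  induction n with
  | zero => simp
  | succ n ih =>
      rw [List.replicate_succ, List.pairwise_cons]
      exact ⟨fun b hb => le_of_eq (List.eq_of_mem_replicate hb).symm, ih⟩

-- main invariant: A's loop on the remaining sorted multiset equals B's drain over
-- the remaining distinct values, given the count function agrees above v0
theorem main_inv (vs : List Int) (s : List Int) (f : Int → Int) (v0 : Int)
    (hs : s.Pairwise (· ≤ ·))
    (hsub : ∀ x ∈ s, x ∈ vs)
    (hchain : vs.Pairwise (· < ·))
    (hgt : ∀ x ∈ vs, v0 < x)
    (hf : ∀ w, v0 < w → f w = (s.count w : Int)) :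
    aLoop s = fLoop vs f := by
  induction vs generalizing s f v0 with
  | nil =>
      cases s with
      | nil => rw [aLoop_nil]; rfl
      | cons x s' => exact absurd (hsub x (by simp)) (by simp)
  | cons v vs ih =>
      have hvlt : ∀ y ∈ vs, v < y := (List.pairwise_cons.mp hchain).1
      have hchain' : vs.Pairwise (· < ·) := (List.pairwise_cons.mp hchain).2
      have hv0v : v0 < v := hgt v (by simp)
      have hballv : ∀ x ∈ s, v ≤ x := by
        intro x hx
        rcases List.mem_cons.mp (hsub x hx) with rfl | hm
        · exact le_refl _
        · exact le_of_lt (hvlt x hm)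
      obtain ⟨r, hsr, hrp, hrb, hrc⟩ := sorted_decomp v s hs hballv
      obtain ⟨r', hr', hrp', hrb', hrc'⟩ := sorted_decomp (v + 1) r hrp hrb
      have hrb'2 : ∀ x ∈ r', v + 2 ≤ x := fun x hx => by have := hrb' x hx; omega
      obtain ⟨r'', hr'', hrp'', hrb'', hrc''⟩ := sorted_decomp (v + 2) r' hrp' hrb'2
      have hr3 : ∀ x ∈ r'', v + 3 ≤ x := fun x hx => by have := hrb'' x hx; omega
      have e1 : r.count (v + 1) = s.count (v + 1) := by
        have := hrc (v + 1); simpa [show (v + 1 : Int) ≠ v by omega] using this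
      have e2 : r'.count (v + 2) = s.count (v + 2) := by
        have h1 := hrc' (v + 2); have h2 := hrc (v + 2)
        rw [if_neg (show (v + 2 : Int) ≠ v + 1 by omega)] at h1
        rw [if_neg (show (v + 2 : Int) ≠ v by omega)] at h2
        omega
      have hsdecomp : s = List.replicate (s.count v) v ++
          (List.replicate (s.count (v + 1)) (v + 1) ++ (List.replicate (s.count (v + 2)) (v + 2) ++ r'')) := by
        rw [← e1, ← e2, ← hr'', ← hr']; exact hsr
      have hfv : f v = (s.count v : Int) := hf v hv0v
      have hf1 : f (v + 1) = (s.count (v + 1) : Int) := hf (v + 1) (by omega)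
      have hf2 : f (v + 2) = (s.count (v + 2) : Int) := hf (v + 2) (by omega)
      rw [hsdecomp, inner v _ _ _ r'' hr3]
      rw [show fLoop (v :: vs) f = List.replicate (f v - min (f v) (min (f (v + 1)) (f (v + 2)))).toNat v ++
          fLoop vs (fun w => if w = v + 2 then f (v + 2) - min (f v) (min (f (v + 1)) (f (v + 2)))
            else if w = v + 1 then f (v + 1) - min (f v) (min (f (v + 1)) (f (v + 2))) else f w) from rfl]
      congr 1
      · congr 1
        rw [hfv, hf1, hf2]
        omega
      · -- the recursive call: apply the induction hypothesis at bound v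
        have hm1 : min (s.count v) (min (s.count (v + 1)) (s.count (v + 2))) ≤ s.count (v + 1) := by omega
        have hm2 : min (s.count v) (min (s.count (v + 1)) (s.count (v + 2))) ≤ s.count (v + 2) := by omega
        have hrsub : ∀ x ∈ r'', x ∈ s := by
          intro x hx
          rw [hsr, hr', hr'']
          simp only [List.mem_append]
          exact Or.inr (Or.inr (Or.inr hx))
        apply ih
        · -- pairwise of the new remaining list
          rw [List.pairwise_append]
          refine ⟨pairwise_replicate_le _ _, ?_, ?_⟩
          · rw [List.pairwise_append]
            refine ⟨pairwise_replicate_le _ _, hrp'', ?_⟩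
            intro a ha b hb
            have := List.eq_of_mem_replicate ha
            have := hr3 b hb
            omega
          · intro a ha b hb
            have ha' := List.eq_of_mem_replicate ha
            simp only [List.mem_append] at hb
            rcases hb with hb | hb
            · have := List.eq_of_mem_replicate hb; omega
            · have := hr3 b hb; omega
        · intro x hx
          simp only [List.mem_append] at hx
          rcases hx with hx | hx | hx
          · have hx' := List.eq_of_mem_replicate hx
            have hlen : 0 < s.count (v + 1) := by
              rcases List.mem_replicate.mp hx with ⟨hne, _⟩
              omega
            have hmem : (v + 1) ∈ s := List.count_pos_iff.mp hlen
            rcases List.mem_cons.mp (hsub _ hmem) with h | h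
            · omega
            · subst hx'; exact h
          · have hx' := List.eq_of_mem_replicate hx
            have hlen : 0 < s.count (v + 2) := by
              rcases List.mem_replicate.mp hx with ⟨hne, _⟩
              omega
            have hmem : (v + 2) ∈ s := List.count_pos_iff.mp hlen
            rcases List.mem_cons.mp (hsub _ hmem) with h | h
            · omega
            · subst hx'; exact h
          · have hxs := hrsub x hx
            rcases List.mem_cons.mp (hsub x hxs) with rfl | h
            · have := hr3 x hx; omega
            · exact h
        · exact hchain'
        · exact hvlt
        · -- the updated count function agrees with the new remaining list above v
          intro w hw
          have hwr'' : w ∉ r'' → (r''.count w = 0) := List.count_eq_zero_of_not_mem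
          by_cases hw2 : w = v + 2
          · subst hw2
            have hnm : (v + 2) ∉ r'' := fun h => by have := hr3 _ h; omega
            rw [if_pos rfl, hf2, hfv, hf1]
            simp [List.count_append, List.count_replicate,
              show ¬((v + 1 : Int) == v + 2) = true by simp,
              List.count_eq_zero_of_not_mem hnm]
          · by_cases hw1 : w = v + 1
            · subst hw1
              have hnm : (v + 1) ∉ r'' := fun h => by have := hr3 _ h; omega
              rw [if_neg hw2, if_pos rfl, hf1, hfv, hf2]
              simp [List.count_append, List.count_replicate,
                show ¬((v + 2 : Int) == v + 1) = true by simp,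
                List.count_eq_zero_of_not_mem hnm]
            · simp only [if_neg hw2, if_neg hw1]
              rw [hf w (by omega)]
              have hs_w : s.count w = r''.count w := by
                have h1 := hrc w; have h2 := hrc' w; have h3 := hrc'' w
                rw [if_neg (show w ≠ v by omega)] at h1
                rw [if_neg hw1] at h2
                rw [if_neg hw2] at h3
                omega
              rw [hs_w]
              congr 1
              simp [List.count_append, List.count_replicate,
                show ¬((v + 1 : Int) == w) = true by simp only [beq_iff_eq]; omega,
                show ¬((v + 2 : Int) == w) = true by simp only [beq_iff_eq]; omega]

-- ===== VERDICT (by name: the statement is the Claim_ definition above) =====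
theorem get_forward_bad_cards_py_spec : Claim_equal_get_forward_bad_cards_py := by
  intro cards hdom
  unfold Spec_get_forward_bad_cards_py
  simp only [get_forward_bad_cards_py, get_forward_bad_cards_py_alt,
    PySem.Dict.foldl_insert_getD_add_one_eq_counter, PySem.Dict.keys_counter]
  rw [bLoop_eq_fLoop]
  apply main_inv _ _ _ (-2147483649)
  · have h := PySem.List.sorted_pairwise cards (fun x => x)
    simpa using h
  · intro x hx
    rw [PySem.List.mem_sorted] at hx
    rw [PySem.List.mem_sorted, PySem.Set.mem_ofList]
    exact hx
  · exact PySem.List.sorted_ofList_pairwise_lt cards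
  · intro x hx
    rw [PySem.List.mem_sorted, PySem.Set.mem_ofList] at hx
    have := List.all_eq_true.mp hdom x hx
    have := of_decide_eq_true this
    omega
  · intro w _
    rw [PySem.Dict.getD_counter]
    congr 1
    exact ((PySem.List.sorted_perm cards (fun x => x) false).count_eq w).symm
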